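-- pv_equiv track=rewrite | github.com/nlavidas/Diachronic-Linguistics-Platform | _archive/diachronic-valency-corpus/academic_resource_integration.py | apply_digrec_periodization
-- ===== SOURCE A (Python) =====
-- def apply_digrec_periodization(year):
--     """Classify year into DiGrec period."""
--     periods = [
--         ("Archaic", -800, -500),
--         ("Classical", -499, -323),
--         ("Hellenistic", -322, -31),
--         ("Roman", -30, 400),
--         ("Byzantine", 401, 1453)
--     ]
--     for name, start, end in periods:
--         if start <= year <= end:
--             return name
--     return "Unknown"
-- ===== SOURCE B (Python) =====
-- _STARTS = [-499, -322, -30, 401]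
-- _NAMES = ["Archaic", "Classical", "Hellenistic", "Roman", "Byzantine"]
--
--
-- def apply_digrec_periodization(year):
--     """Classify year into DiGrec period."""
--     if year < -800 or year > 1453:
--         return "Unknown"
--     # binary search (bisect_right) over the period start-years
--     lo, hi = 0, len(_STARTS)
--     while lo < hi:
--         mid = (lo + hi) // 2
--         if _STARTS[mid] <= year:
--             lo = mid + 1
--         else:
--             hi = mid
--     return _NAMES[lo]
-- ===== Notes on version B (the rewrite author's own statement) =====
-- stated objective: alternative
-- what changed: Replaces the linear scan over five (name,start,end) ranges by a bounds guard plus a hand-written bisect_right binary search over the four period start-years, indexing into a name table.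
import Mathlib
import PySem

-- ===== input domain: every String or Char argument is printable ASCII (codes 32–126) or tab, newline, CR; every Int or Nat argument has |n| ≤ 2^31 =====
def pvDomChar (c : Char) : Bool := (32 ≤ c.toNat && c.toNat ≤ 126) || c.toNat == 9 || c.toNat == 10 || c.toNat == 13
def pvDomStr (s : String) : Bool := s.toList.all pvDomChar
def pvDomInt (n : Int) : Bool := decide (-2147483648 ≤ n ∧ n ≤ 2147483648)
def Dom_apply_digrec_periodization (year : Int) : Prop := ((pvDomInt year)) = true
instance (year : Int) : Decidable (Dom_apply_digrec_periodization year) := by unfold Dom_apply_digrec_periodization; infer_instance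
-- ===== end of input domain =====

-- B replaces A's linear scan over five (start,end) ranges by a bounds guard plus a
-- binary search (bisect_right) over the period start-years; alternative structure, same cost.


-- ===== PORT A =====
def pvPeriods : List (String × Int × Int) :=
  [("Archaic", -800, -500), ("Classical", -499, -323), ("Hellenistic", -322, -31),
   ("Roman", -30, 400), ("Byzantine", 401, 1453)]

def pvScan (year : Int) : List (String × Int × Int) → String
  | [] => "Unknown"
  | (name, s, e) :: rest => if s ≤ year ∧ year ≤ e then name else pvScan year rest

def apply_digrec_periodization (year : Int) : String := pvScan year pvPeriods

-- ===== PORT B =====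
def pvStarts : List Int := [-499, -322, -30, 401]
def pvNames : List String := ["Archaic", "Classical", "Hellenistic", "Roman", "Byzantine"]

-- hand-written bisect_right loop of Source B, recursion on hi - lo
def pvBsearch (year : Int) (lo hi : Nat) : Nat :=
  if lo < hi then
    let mid := (lo + hi) / 2
    if pvStarts.getD mid 0 ≤ year then pvBsearch year (mid + 1) hi
    else pvBsearch year lo mid
  else lo
termination_by hi - lo
decreasing_by all_goals omega

def apply_digrec_periodization_alt (year : Int) : String :=
  if year < -800 ∨ year > 1453 then "Unknown"
  else pvNames.getD (pvBsearch year 0 pvStarts.length) ""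

-- ===== PRECONDITION & SPEC =====
def Spec_apply_digrec_periodization (year : Int) (out : String) : Prop := out = apply_digrec_periodization_alt year
instance (year : Int) (out : String) : Decidable (Spec_apply_digrec_periodization year out) := by unfold Spec_apply_digrec_periodization; infer_instance

-- ===== CLAIM (what is proved, stated in full; the proofs are below) =====
def Claim_equal_apply_digrec_periodization : Prop := ∀ (year : Int), Dom_apply_digrec_periodization year → Spec_apply_digrec_periodization year (apply_digrec_periodization year)

-- ===== LEMMAS AND PROOFS =====
lemma pvBsearch_eval (year : Int) :
    pvBsearch year 0 4 =
      if year < -499 then 0 else if year < -322 then 1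
      else if year < -30 then 2 else if year < 401 then 3 else 4 := by
  rw [pvBsearch.eq_def]; norm_num [pvStarts]
  split_ifs with h1 <;> rw [pvBsearch.eq_def] <;> norm_num [pvStarts] <;>
    (try split_ifs) <;> (try rw [pvBsearch.eq_def]) <;> (try norm_num [pvStarts]) <;>
    (try split_ifs) <;> (try rw [pvBsearch.eq_def]) <;> (try norm_num [pvStarts]) <;> omega

-- ===== VERDICT (by name: the statement is the Claim_ definition above) =====
theorem apply_digrec_periodization_spec : Claim_equal_apply_digrec_periodization := by
  intro year _
  unfold Spec_apply_digrec_periodization apply_digrec_periodization apply_digrec_periodization_alt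
  rw [show pvStarts.length = 4 from rfl, pvBsearch_eval]
  simp only [pvScan, pvPeriods, pvNames]
  split_ifs <;> first | rfl | (exfalso; omega)
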